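-- pv_equiv track=rewrite | github.com/Heidge/holbertonschool-interview | utf8_validation/0-validate_utf8.py | check_after
-- ===== SOURCE A (Python) =====
-- def check_after(binary_num):
--     count = 0
--     for char in binary_num[1:4]:
--         if char == "1":
--             count += 1
--         else:
--             break
--     return count
-- ===== SOURCE B (Python) =====
-- def check_after(binary_num):
--     s = binary_num[1:4]
--     return len(s) - len(s.lstrip("1"))
-- ===== Notes on version B (the rewrite author's own statement) =====
-- stated objective: idiomatic
-- what changed: Replaces the accumulate-and-break loop with a single string operation: the count of leading '1's in binary_num[1:4] is len(s) - len(s.lstrip('1')).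
import Mathlib
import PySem

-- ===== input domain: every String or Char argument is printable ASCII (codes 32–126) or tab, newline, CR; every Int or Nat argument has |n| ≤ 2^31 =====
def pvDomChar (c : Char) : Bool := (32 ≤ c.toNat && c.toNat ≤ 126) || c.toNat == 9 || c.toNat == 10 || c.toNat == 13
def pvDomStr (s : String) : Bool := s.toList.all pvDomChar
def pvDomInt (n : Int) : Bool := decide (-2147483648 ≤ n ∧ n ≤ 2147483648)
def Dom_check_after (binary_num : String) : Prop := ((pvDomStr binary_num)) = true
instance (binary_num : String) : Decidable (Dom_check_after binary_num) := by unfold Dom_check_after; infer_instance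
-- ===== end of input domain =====

-- B replaces A's accumulate-and-break loop by len(s) - len(s.lstrip('1')) on s = binary_num[1:4] (idiomatic; same cost).

-- ===== PORT A =====
-- the for-loop with break over binary_num[1:4], carrying the count
def check_after_loop : List Char → Int → Int
  | [], count => count
  | ch :: rest, count => if ch = '1' then check_after_loop rest (count + 1) else count

def check_after (binary_num : String) : Int :=
  check_after_loop (PySem.List.slice binary_num.toList (some 1) (some 4)) 0

-- ===== PORT B =====
-- s.lstrip("1") ported by hand as dropWhile (· = '1'): exact, since lstrip('1') removes exactly the leading run of '1' characters
def check_after_alt (binary_num : String) : Int :=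
  let s := PySem.List.slice binary_num.toList (some 1) (some 4)
  (s.length : Int) - ((s.dropWhile (fun c => c = '1')).length : Int)

-- ===== PRECONDITION & SPEC =====
def Spec_check_after (binary_num : String) (out : Int) : Prop := out = check_after_alt binary_num
instance (binary_num : String) (out : Int) : Decidable (Spec_check_after binary_num out) := by unfold Spec_check_after; infer_instance

-- ===== CLAIM (what is proved, stated in full; the proofs are below) =====
def Claim_equal_check_after : Prop := ∀ (binary_num : String), Dom_check_after binary_num → Spec_check_after binary_num (check_after binary_num)

-- ===== LEMMAS AND PROOFS =====
theorem check_after_loop_eq (l : List Char) (c : Int) :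
    check_after_loop l c = c + (l.length : Int) - ((l.dropWhile (fun ch => ch = '1')).length : Int) := by
  induction l generalizing c with
  | nil => simp [check_after_loop]
  | cons ch rest ih =>
    by_cases h : ch = '1'
    · simp [check_after_loop, h, ih]; ring
    · simp [check_after_loop, h, List.dropWhile]

-- ===== VERDICT (by name: the statement is the Claim_ definition above) =====
theorem check_after_spec : Claim_equal_check_after := by
  intro s _
  unfold Spec_check_after check_after check_after_alt
  rw [check_after_loop_eq]
  ring
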